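-- pv_equiv track=rewrite | github.com/michaelgruenstaeudl/SPTSPD | annonex2embl/DegappingOps.py | rm_trailambig
-- ===== SOURCE A (Python) =====
-- def rm_trailambig(seq, rmchar, charsets):
--     ''' This class removes trailing ambiguous nucleotides from a DNA
--     sequence while maintaining the annotations.
--     '''
--     from copy import copy
--
--     if seq[-1] == rmchar:
--         trail_stripoff = len(seq.rstrip(rmchar))
--         range_stripoff = range(trail_stripoff, len(seq))
--         #range_stripoff = range(trail_stripoff, len(seq)+1)
--         #print 'range_stripoff:', range_stripoff
--         for gene_name, indices in charsets.items():
--             indices_new = copy(indices)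
--             for index in range_stripoff:
--                 if index in indices_new:
--                     indices_new.remove(index)
--             #    else:
--             #        print "Warning: Index %s out of range." %(index)
--             charsets[gene_name] = indices_new
--
--         ## counting must be reversed, as we remove from tail
--         #for index in reversed(range(trail_stripoff, len(seq)+1)):
--             #for gene_name, indices in annotations.items():
--                 #if index in indices:
--                     #indices.remove(index)
--                 #annotations[gene_name] = indices
--
--         seq = seq[:trail_stripoff]
--
--     return seq, charsets
-- ===== SOURCE B (Python) =====
-- def rm_trailambig(seq, rmchar, charsets):
--     ''' Remove trailing ambiguous nucleotides while maintaining annotations.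
--     One pass per index list consuming a precomputed removal set, instead of
--     scanning the list once per removed position. Does not mutate its arguments
--     (A updates the charsets dict in place); the return value is identical.
--     '''
--     if not seq or seq[-1] != rmchar:
--         return seq, charsets
--     keep = len(seq.rstrip(rmchar))
--     removals = set(range(keep, len(seq)))
--     new_charsets = {}
--     for gene_name, indices in charsets.items():
--         pending = set(removals)
--         kept = []
--         for idx in indices:
--             if idx in pending:
--                 pending.discard(idx)   # drop only the first occurrence
--             else:
--                 kept.append(idx)
--         new_charsets[gene_name] = kept
--     return seq[:keep], new_charsets
-- ===== Notes on version B (the rewrite author's own statement) =====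
-- stated objective: alternative
-- what changed: Instead of scanning each gene's index list once for every stripped position (membership test plus list.remove per position), B builds the removal range as a set once and makes a single pass over each index list, consuming each removable value from the set on its first occurrence; B also leaves the input dict unmutated. (speed not measured; asymptotically it avoids the r-fold inner scans)
import Mathlib
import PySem

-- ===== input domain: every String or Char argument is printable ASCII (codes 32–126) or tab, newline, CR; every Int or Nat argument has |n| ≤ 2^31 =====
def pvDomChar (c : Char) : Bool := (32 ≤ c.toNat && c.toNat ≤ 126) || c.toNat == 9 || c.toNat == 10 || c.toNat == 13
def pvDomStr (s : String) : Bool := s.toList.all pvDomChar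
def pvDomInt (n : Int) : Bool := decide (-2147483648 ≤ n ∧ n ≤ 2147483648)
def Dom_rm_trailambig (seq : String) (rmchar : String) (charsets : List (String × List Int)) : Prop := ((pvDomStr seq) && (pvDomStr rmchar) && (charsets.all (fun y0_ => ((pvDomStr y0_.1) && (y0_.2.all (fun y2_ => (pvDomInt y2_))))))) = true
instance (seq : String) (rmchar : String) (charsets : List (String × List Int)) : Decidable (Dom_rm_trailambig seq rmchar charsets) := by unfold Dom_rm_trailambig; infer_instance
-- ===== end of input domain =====

-- B makes one pass per index list consuming a precomputed removal set, instead of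
-- scanning the list once per stripped position; B does not mutate the charsets dict
-- (A updates it in place) — the claim is about the RETURN value only.

-- ===== PORT A =====
-- exact port of str.rstrip(chars): remove trailing characters that occur in chars
def pvRstripChars (cs : List Char) (chars : List Char) : List Char :=
  (cs.reverse.dropWhile (fun c => chars.contains c)).reverse

def rm_trailambig (seq : String) (rmchar : String) (charsets : List (String × List Int)) : String × (List (String × List Int)) :=
  let cs := seq.toList
  match cs.getLast? with                                    -- seq[-1]; none = IndexError, excluded by Pre_
  | none => (seq, charsets)
  | some c =>
    if [c] = rmchar.toList then                             -- seq[-1] == rmchar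
      let trail_stripoff : Int := (pvRstripChars cs rmchar.toList).length
      let range_stripoff := PySem.List.pyRange trail_stripoff (cs.length : Int) 1
      let charsets' := charsets.map (fun p =>
        (p.1, range_stripoff.foldl (fun l index =>
                if l.contains index then (PySem.List.remove? l index).getD l else l) p.2))
      (String.ofList (PySem.List.slice cs none (some trail_stripoff)), charsets')
    else (seq, charsets)

-- ===== PORT B =====
-- one pass over the index list, consuming each removable value from `pending` on its first occurrence
def pvOnePass (pending : PySem.Set Int) (l : List Int) : List Int :=
  match l with
  | [] => []
  | x :: xs =>
    if PySem.Set.contains pending x then pvOnePass (PySem.Set.discard pending x) xs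
    else x :: pvOnePass pending xs

def rm_trailambig_alt (seq : String) (rmchar : String) (charsets : List (String × List Int)) : String × (List (String × List Int)) :=
  let cs := seq.toList
  match cs.getLast? with                                    -- `not seq or seq[-1] != rmchar` guard
  | none => (seq, charsets)
  | some c =>
    if [c] = rmchar.toList then
      let keep : Int := (pvRstripChars cs rmchar.toList).length
      let removals : PySem.Set Int := PySem.Set.ofList (PySem.List.pyRange keep (cs.length : Int) 1)
      (String.ofList (PySem.List.slice cs none (some keep)),
       charsets.map (fun p => (p.1, pvOnePass removals p.2)))
    else (seq, charsets)

-- ===== PRECONDITION & SPEC =====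
-- Pre_ excludes only the empty seq, on which A raises IndexError at seq[-1].
def Pre_rm_trailambig (seq : String) (rmchar : String) (charsets : List (String × List Int)) : Prop := seq ≠ ""
instance (seq : String) (rmchar : String) (charsets : List (String × List Int)) : Decidable (Pre_rm_trailambig seq rmchar charsets) := by unfold Pre_rm_trailambig; infer_instance
def pvWitness_rm_trailambig : String × String × (List (String × List Int)) := ("ACGNN", "N", [("gene1", [0, 1, 3, 4]), ("gene2", [2, 4, 4])])

def Spec_rm_trailambig (seq : String) (rmchar : String) (charsets : List (String × List Int)) (out : String × (List (String × List Int))) : Prop := out = rm_trailambig_alt seq rmchar charsets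
instance (seq : String) (rmchar : String) (charsets : List (String × List Int)) (out : String × (List (String × List Int))) : Decidable (Spec_rm_trailambig seq rmchar charsets out) := by unfold Spec_rm_trailambig; infer_instance

-- ===== CLAIM (what is proved, stated in full; the proofs are below) =====
def Claim_equal_rm_trailambig : Prop := ∀ (seq : String) (rmchar : String) (charsets : List (String × List Int)), Dom_rm_trailambig seq rmchar charsets → Pre_rm_trailambig seq rmchar charsets → Spec_rm_trailambig seq rmchar charsets (rm_trailambig seq rmchar charsets)
-- ===== LEMMAS AND PROOFS =====

-- pvOnePass with an empty pending set keeps the list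
theorem pvOnePass_nil (l : List Int) : pvOnePass [] l = l := by
  induction l with
  | nil => rfl
  | cons x xs ih => simpa [pvOnePass] using ih

-- a pending set that does not contain v can be pruned of v without effect
theorem pvOnePass_discard_not_mem (T : PySem.Set Int) (v : Int) (hv : v ∉ T) :
    PySem.Set.discard T v = T :=
  List.filter_eq_self.mpr (fun y hy => by
    have hne : y ≠ v := fun h => hv (h ▸ hy)
    simp [hne])

-- peeling one pending value v (absent from the rest T) off the set equals
-- erasing v's first occurrence from the list first
theorem pvOnePass_cons (v : Int) (T : PySem.Set Int) (hv : v ∉ T) (l : List Int) :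
    pvOnePass (v :: T) l = pvOnePass T (l.erase v) := by
  induction l generalizing T with
  | nil => rfl
  | cons x xs ih =>
    by_cases hxv : x = v
    · subst hxv
      simp only [pvOnePass, PySem.Set.contains, List.contains_cons, BEq.rfl, Bool.true_or,
        if_true, List.erase_cons_head]
      have h1 : PySem.Set.discard (x :: T) x = PySem.Set.discard T x := by
        simp [PySem.Set.discard, List.filter_cons]
      rw [h1, pvOnePass_discard_not_mem T x hv]
    · have hvx : v ≠ x := fun h => hxv h.symm
      have herase : (x :: xs).erase v = x :: xs.erase v :=
        List.erase_cons_tail (by simp [hxv])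
      by_cases hxT : x ∈ T
      · have hc : PySem.Set.contains (v :: T) x = true := by
          simp [PySem.Set.contains, hxT]
        have hc2 : PySem.Set.contains T x = true := by
          simp [PySem.Set.contains, hxT]
        have hd : PySem.Set.discard (v :: T) x = v :: PySem.Set.discard T x := by
          simp [PySem.Set.discard, List.filter_cons, hvx]
        have hv2 : v ∉ PySem.Set.discard T x := by
          intro hmem
          exact hv ((PySem.Set.mem_discard T x v).mp hmem).1
        simp only [pvOnePass, hc, hc2, if_true, herase, hd]
        exact ih (PySem.Set.discard T x) hv2
      · have hc : PySem.Set.contains (v :: T) x = false := by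
          simp [PySem.Set.contains, hxT, hxv]
        have hc2 : PySem.Set.contains T x = false := by
          simp [PySem.Set.contains, hxT]
        simp only [pvOnePass, hc, hc2, Bool.false_eq_true, if_false, herase]
        rw [ih T hv]

-- A's inner loop step is exactly List.erase
theorem pvStep_eq_erase (l : List Int) (i : Int) :
    (if l.contains i then (PySem.List.remove? l i).getD l else l) = l.erase i := by
  by_cases h : i ∈ l
  · rw [PySem.List.remove?_eq_some_erase l i h]
    simp [h]
  · simp [h, List.erase_of_not_mem h]

-- folding erase over a duplicate-free list of values = one consuming pass
theorem pvFoldl_erase_eq_onePass (S : List Int) (hS : S.Nodup) (l : List Int) :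
    S.foldl (fun l i => l.erase i) l = pvOnePass S l := by
  induction S generalizing l with
  | nil => simp [pvOnePass_nil]
  | cons v T ih =>
    rcases List.nodup_cons.mp hS with ⟨hv, hT⟩
    simp only [List.foldl_cons]
    rw [ih hT (l.erase v), pvOnePass_cons v T hv l]

theorem pvGene_eq (keep n : Int) (l : List Int) :
    (PySem.List.pyRange keep n 1).foldl (fun l index =>
        if l.contains index then (PySem.List.remove? l index).getD l else l) l
      = pvOnePass (PySem.Set.ofList (PySem.List.pyRange keep n 1)) l := by
  rw [PySem.Set.ofList_eq_self_of_nodup _ (PySem.List.nodup_pyRange_one keep n)]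
  rw [← pvFoldl_erase_eq_onePass _ (PySem.List.nodup_pyRange_one keep n) l]
  exact PySem.List.foldl_congr_mem _ _ _ l (fun acc i _ => pvStep_eq_erase acc i)

-- ===== VERDICT (by name: the statement is the Claim_ definition above) =====
theorem rm_trailambig_spec : Claim_equal_rm_trailambig := by
  intro seq rmchar charsets _ _
  unfold Spec_rm_trailambig rm_trailambig rm_trailambig_alt
  cases h : seq.toList.getLast? with
  | none => simp [h]
  | some c =>
    by_cases hg : [c] = rmchar.toList
    · simp only [h, hg, if_true]
      refine congrArg _ ?_
      exact List.map_congr_left (fun p _ =>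
        congrArg _ (pvGene_eq ((pvRstripChars seq.toList rmchar.toList).length : Int)
          (seq.toList.length : Int) p.2))
    · simp [h, hg]
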